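-- pv_equiv track=rewrite | github.com/Omarkh98/Library-License-Checker | license_utils.py | rate_license
-- ===== SOURCE A (Python) =====
-- def rate_license(license_name: str):
--     """
--     Categorize a software license into a trustworthiness rating.
--
--     This function classifies a given license name as one of the following categories:
--     - ✅ Trusted: Common permissive licenses like MIT, Apache, BSD, or PSF.
--     - ⚠️ Caution: Less permissive licenses like LGPL or MPL.
--     - ❌ Risky: Restrictive licenses like GPL, AGPL, or unknown/ambiguous types.
--     - ⚠️ Unknown: If the license does not match any known patterns.
--
--     The classification is based on substring matches in the uppercase form
--     of the license name.
--
--     Args: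
--         license_name (str): The normalized license name to rate.
--
--     Returns:
--         str: A visual indicator and label of the license rating.
--     """
--     trusted = ["MIT", "APACHE", "BSD", "PSF"]
--     caution = ["LGPL", "MPL", "EPL"]
--     risky = ["GPL", "AGPL", "UNKNOWN", "OTHER"]
--
--     license_upper = license_name.upper()
--
--     if any(t in license_upper for t in trusted):
--         return "✅ Trusted"
--     elif any(c in license_upper for c in caution):
--         return "⚠️ Caution"
--     elif any(r in license_upper for r in risky):
--         return "❌ Risky"
--     else:
--         return "⚠️ Unknown"
-- ===== SOURCE B (Python) =====
-- # Position-driven scan: walk the string once, testing each keyword as a prefix at every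
-- # position and keeping the minimum category code; map the code to its label at the end.
-- KEYWORDS = [
--     ("MIT", 0), ("APACHE", 0), ("BSD", 0), ("PSF", 0),
--     ("LGPL", 1), ("MPL", 1), ("EPL", 1),
--     ("GPL", 2), ("AGPL", 2), ("UNKNOWN", 2), ("OTHER", 2),
-- ]
-- LABELS = ["✅ Trusted", "⚠️ Caution", "❌ Risky", "⚠️ Unknown"]
--
-- def rate_license(license_name: str):
--     up = license_name.upper()
--     best = 3
--     for i in range(len(up)):
--         for kw, cat in KEYWORDS:
--             if up.startswith(kw, i):
--                 best = min(best, cat)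
--     return LABELS[best]
-- ===== Notes on version B (the rewrite author's own statement) =====
-- stated objective: alternative
-- what changed: Instead of testing each keyword for containment with three any()-scans, B walks the uppercased string position by position, testing each keyword as a prefix at every position and folding the minimum category code (trusted=0 < caution=1 < risky=2 < unknown=3), then indexes a label table; priority is the numeric minimum rather than an if/elif chain.
import Mathlib
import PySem

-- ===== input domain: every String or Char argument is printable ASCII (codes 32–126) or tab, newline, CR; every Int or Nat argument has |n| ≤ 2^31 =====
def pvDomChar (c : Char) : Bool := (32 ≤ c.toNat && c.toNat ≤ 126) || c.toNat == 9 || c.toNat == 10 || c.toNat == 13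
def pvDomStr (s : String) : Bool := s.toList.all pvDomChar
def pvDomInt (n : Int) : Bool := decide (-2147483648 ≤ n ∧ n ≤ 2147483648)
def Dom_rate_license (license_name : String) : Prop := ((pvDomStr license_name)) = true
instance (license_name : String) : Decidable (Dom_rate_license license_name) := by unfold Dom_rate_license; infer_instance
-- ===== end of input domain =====

-- B replaces A's three any()-containment scans by a single position-by-position walk that prefix-tests
-- every keyword at each position and folds the minimum category code, then indexes a label table (alternative decomposition).


-- ===== PORT A =====
-- A: three keyword lists, any()-substring scan per list, if/elif chain.
def rate_license (license_name : String) : String :=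
  let trusted : List String := ["MIT", "APACHE", "BSD", "PSF"]
  let caution : List String := ["LGPL", "MPL", "EPL"]
  let risky : List String := ["GPL", "AGPL", "UNKNOWN", "OTHER"]
  let license_upper := PySem.Str.upper license_name
  if trusted.any (fun t => PySem.Str.isIn t license_upper) then "✅ Trusted"
  else if caution.any (fun c => PySem.Str.isIn c license_upper) then "⚠️ Caution"
  else if risky.any (fun r => PySem.Str.isIn r license_upper) then "❌ Risky"
  else "⚠️ Unknown"

-- ===== PORT B =====
-- B's module tables: (keyword, category code) and the label list.
def pvKeywords : List (List Char × Nat) :=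
  [("MIT".toList, 0), ("APACHE".toList, 0), ("BSD".toList, 0), ("PSF".toList, 0),
   ("LGPL".toList, 1), ("MPL".toList, 1), ("EPL".toList, 1),
   ("GPL".toList, 2), ("AGPL".toList, 2), ("UNKNOWN".toList, 2), ("OTHER".toList, 2)]

def pvLabels : List String := ["✅ Trusted", "⚠️ Caution", "❌ Risky", "⚠️ Unknown"]

-- B's loop 'for i in range(len(up))' walking positions = structural recursion on the suffix;
-- up.startswith(kw, i) is exactly 'kw is a prefix of the suffix at i'.
def pvScan : List Char → Nat → Nat
  | [], best => best
  | c :: rest, best =>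
      pvScan rest (pvKeywords.foldl
        (fun acc p => if List.isPrefixOf p.1 (c :: rest) then min acc p.2 else acc) best)

def rate_license_alt (license_name : String) : String :=
  let up := (PySem.Str.upper license_name).toList
  let best := pvScan up 3
  -- LABELS[best]; best ≤ 3 always, so the index is in range and the default is unreachable
  (PySem.List.pyGet? pvLabels (best : Int)).getD ""

-- ===== PRECONDITION & SPEC =====
def Spec_rate_license (license_name : String) (out : String) : Prop := out = rate_license_alt license_name
instance (license_name : String) (out : String) : Decidable (Spec_rate_license license_name out) := by unfold Spec_rate_license; infer_instance

-- ===== CLAIM (what is proved, stated in full; the proofs are below) =====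
def Claim_equal_rate_license : Prop := ∀ (license_name : String), Dom_rate_license license_name → Spec_rate_license license_name (rate_license license_name)

-- ===== LEMMAS AND PROOFS =====

-- The inner keyword fold keeps the min of the matching categories.
theorem pv_foldl_min_le_iff (K : List (List Char × Nat)) (pred : List Char → Bool) (b c : Nat) :
    (K.foldl (fun acc p => if pred p.1 then min acc p.2 else acc) b) ≤ c ↔
      b ≤ c ∨ ∃ p ∈ K, pred p.1 = true ∧ p.2 ≤ c := by
  induction K generalizing b with
  | nil => simp
  | cons p K ih =>
      simp only [List.foldl_cons, ih, List.mem_cons]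
      cases h : pred p.1
      · simp [h]
      · simp [h, min_le_iff]
        tauto

-- pvScan computes the min over all keyword occurrences (as suffix-prefixes = infixes).
theorem pvScan_le_iff (l : List Char) (b c : Nat) :
    pvScan l b ≤ c ↔ b ≤ c ∨ ∃ p ∈ pvKeywords, p.2 ≤ c ∧ p.1 <:+: l := by
  induction l generalizing b with
  | nil =>
      simp only [pvScan]
      constructor
      · intro h; exact Or.inl h
      · rintro (h | ⟨p, hp, _, hinf⟩)
        · exact h
        · rw [List.infix_nil] at hinf
          fin_cases hp <;> exact absurd hinf (by decide)
  | cons ch rest ih =>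
      simp only [pvScan]
      rw [ih, pv_foldl_min_le_iff pvKeywords (fun k => k.isPrefixOf (ch :: rest)) b c]
      simp only [List.isPrefixOf_iff_prefix, List.infix_cons_iff]
      constructor
      · rintro ((h | ⟨p, hp, hpre, hc⟩) | ⟨p, hp, hc, hinf⟩)
        · exact Or.inl h
        · exact Or.inr ⟨p, hp, hc, Or.inl hpre⟩
        · exact Or.inr ⟨p, hp, hc, Or.inr hinf⟩
      · rintro (h | ⟨p, hp, hc, hpre | hinf⟩)
        · exact Or.inl (Or.inl h)
        · exact Or.inl (Or.inr ⟨p, hp, hpre, hc⟩)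
        · exact Or.inr ⟨p, hp, hc, hinf⟩

-- ===== VERDICT (by name: the statement is the Claim_ definition above) =====
theorem rate_license_spec : Claim_equal_rate_license := by
  intro s _
  unfold Spec_rate_license rate_license rate_license_alt
  have h0 := pvScan_le_iff ((PySem.Str.upper s).toList) 3 0
  have h1 := pvScan_le_iff ((PySem.Str.upper s).toList) 3 1
  have h2 := pvScan_le_iff ((PySem.Str.upper s).toList) 3 2
  have h3 : pvScan ((PySem.Str.upper s).toList) 3 ≤ 3 :=
    (pvScan_le_iff _ 3 3).2 (Or.inl le_rfl)
  simp [pvKeywords] at h0 h1 h2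
  simp only [List.any_cons, List.any_nil, Bool.or_false, Bool.or_eq_true,
    PySem.Str.isIn_iff_infix]
  simp
  split_ifs with hT hC hR
  · rw [h0.mpr hT]; decide
  · have hle : pvScan (PySem.Chars.upper s.toList) 3 ≤ 1 :=
      h1.mpr (Or.inr (Or.inr (Or.inr (Or.inr hC))))
    have hnz : pvScan (PySem.Chars.upper s.toList) 3 ≠ 0 := fun h => hT (h0.mp h)
    have e : pvScan (PySem.Chars.upper s.toList) 3 = 1 := by omega
    rw [e]; decide
  · have hle : pvScan (PySem.Chars.upper s.toList) 3 ≤ 2 :=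
      h2.mpr (Or.inr (Or.inr (Or.inr (Or.inr (Or.inr (Or.inr (Or.inr hR)))))))
    have hn1 : ¬ pvScan (PySem.Chars.upper s.toList) 3 ≤ 1 := by
      intro h
      rcases h1.mp h with a|a|a|a|a|a|a
      · exact hT (Or.inl a)
      · exact hT (Or.inr (Or.inl a))
      · exact hT (Or.inr (Or.inr (Or.inl a)))
      · exact hT (Or.inr (Or.inr (Or.inr a)))
      · exact hC (Or.inl a)
      · exact hC (Or.inr (Or.inl a))
      · exact hC (Or.inr (Or.inr a))
    have e : pvScan (PySem.Chars.upper s.toList) 3 = 2 := by omega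
    rw [e]; decide
  · have hn2 : ¬ pvScan (PySem.Chars.upper s.toList) 3 ≤ 2 := by
      intro h
      rcases h2.mp h with a|a|a|a|a|a|a|a|a|a|a
      · exact hT (Or.inl a)
      · exact hT (Or.inr (Or.inl a))
      · exact hT (Or.inr (Or.inr (Or.inl a)))
      · exact hT (Or.inr (Or.inr (Or.inr a)))
      · exact hC (Or.inl a)
      · exact hC (Or.inr (Or.inl a))
      · exact hC (Or.inr (Or.inr a))
      · exact hR (Or.inl a)
      · exact hR (Or.inr (Or.inl a))
      · exact hR (Or.inr (Or.inr (Or.inl a)))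
      · exact hR (Or.inr (Or.inr (Or.inr a)))
    have h3' : pvScan (PySem.Chars.upper s.toList) 3 ≤ 3 := by
      simpa using h3
    have e : pvScan (PySem.Chars.upper s.toList) 3 = 3 := by omega
    rw [e]; decide
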